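-- pv_equiv track=rewrite | github.com/ghluka/ICS3U1-Schoolwork | warmups/block4/strings/sheet55_5.py | text_shuffle1
-- ===== SOURCE A (Python) =====
-- def text_shuffle1(text:str) -> str:
--     """text_shuffle() using indexing"""
--     for i in range(4):
--         even = ""
--         odd = ""
--
--         for i in range(0, len(text)):
--             if i % 2 == 0:
--                 even += text[i]
--             else:
--                 odd += text[i]
--
--         text = f"{even}{odd}"
--
--     return text
-- ===== SOURCE B (Python) =====
-- def text_shuffle1(text: str) -> str:
--     """Compose the single-round even/odd index map with itself 4 times, then gather once."""
--     n = len(text)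
--     h = (n + 1) // 2
--
--     def f(j):
--         return 2 * j if j < h else 2 * (j - h) + 1
--
--     return "".join(text[f(f(f(f(j))))] for j in range(n))
-- ===== Notes on version B (the rewrite author's own statement) =====
-- stated objective: alternative
-- what changed: B composes the single even/odd-round source-index map f with itself four times and builds the result in one gather pass text[f(f(f(f(j))))], instead of A's four rounds each rebuilding two strings character by character.
import Mathlib
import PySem

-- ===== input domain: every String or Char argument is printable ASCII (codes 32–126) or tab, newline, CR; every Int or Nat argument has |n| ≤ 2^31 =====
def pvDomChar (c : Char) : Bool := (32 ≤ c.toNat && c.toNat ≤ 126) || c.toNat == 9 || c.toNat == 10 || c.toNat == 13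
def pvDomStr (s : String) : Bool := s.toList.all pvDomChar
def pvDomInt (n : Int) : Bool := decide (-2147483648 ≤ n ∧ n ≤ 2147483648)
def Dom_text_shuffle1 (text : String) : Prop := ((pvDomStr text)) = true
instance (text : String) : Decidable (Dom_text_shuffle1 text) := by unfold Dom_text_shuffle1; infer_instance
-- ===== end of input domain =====

-- B replaces the four string-rebuilding even/odd rounds by composing the one-round index map with
-- itself four times and gathering the characters in a single pass (objective: alternative algorithm).

-- ===== PORT A =====
-- A, transliterated on the character list (text[i] is always in range; ported with pyGetD):
-- outer 'for i in range(4)', inner loop appending text[i] to even/odd, then text = even ++ odd.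
def text_shuffle1 (text : String) : String :=
  String.ofList <|
    (PySem.List.pyRange 0 4 1).foldl
      (fun (cur : List Char) _ =>
        let st := (PySem.List.pyRange 0 (cur.length : Int) 1).foldl
          (fun (st : List Char × List Char) i =>
            if PySem.Int.mod i 2 = 0 then
              (st.1 ++ [PySem.List.pyGetD cur i ' '], st.2)
            else
              (st.1, st.2 ++ [PySem.List.pyGetD cur i ' ']))
          ([], [])
        st.1 ++ st.2)
      text.toList

-- ===== PORT B =====
-- B: h = (n+1)//2, f the single-round source-index map, one gather pass over range(n) with f∘f∘f∘f.
def text_shuffle1_alt (text : String) : String :=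
  let l := text.toList
  let n : Int := (l.length : Int)
  let h := PySem.Int.floordiv (n + 1) 2
  let f : Int → Int := fun j => if j < h then 2 * j else 2 * (j - h) + 1
  String.ofList ((PySem.List.pyRange 0 n 1).map (fun j => PySem.List.pyGetD l (f (f (f (f j)))) ' '))

-- ===== PRECONDITION & SPEC =====
def Spec_text_shuffle1 (text : String) (out : String) : Prop := out = text_shuffle1_alt text
instance (text : String) (out : String) : Decidable (Spec_text_shuffle1 text out) := by unfold Spec_text_shuffle1; infer_instance

-- ===== CLAIM (what is proved, stated in full; the proofs are below) =====
def Claim_equal_text_shuffle1 : Prop := ∀ (text : String), Dom_text_shuffle1 text → Spec_text_shuffle1 text (text_shuffle1 text)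

-- ===== LEMMAS AND PROOFS =====

-- the single-round source-index map, on Nat indices of a length-n list
def pvF (n j : Nat) : Nat := if j < (n + 1) / 2 then 2 * j else 2 * (j - (n + 1) / 2) + 1

lemma pvF_lt {n j : Nat} (hj : j < n) : pvF n j < n := by
  unfold pvF; split_ifs with h <;> omega

-- one even/odd round, expressed as a gather over the source-index map
def pvRound (cur : List Char) : List Char :=
  (List.range cur.length).map (fun j => cur.getD (pvF cur.length j) ' ')

-- even indices of range n, in order
lemma pvFilter_even (n : Nat) :
    (PySem.List.pyRange 0 n 1).filter (fun i => decide (PySem.Int.mod i 2 = 0)) =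
      (List.range ((n + 1) / 2)).map (fun k => ((2 * k : Nat) : Int)) := by
  induction n with
  | zero => simp [PySem.List.pyRange_one_eq_nil]
  | succ n ih =>
    rw [show ((n + 1 : Nat) : Int) = (n : Int) + 1 by push_cast; ring,
      PySem.List.pyRange_one_succ_right (by omega), List.filter_append, ih]
    have hm : PySem.Int.mod (n : Int) 2 = ((n % 2 : Nat) : Int) := PySem.Int.mod_natCast n 2
    by_cases hpar : n % 2 = 0
    · rw [show (n + 1 + 1) / 2 = (n + 1) / 2 + 1 by omega, List.range_succ, List.map_append]
      simp only [List.filter_cons, List.filter_nil, hm, hpar]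
      norm_num
      omega
    · have h2 : (n + 1 + 1) / 2 = (n + 1) / 2 := by omega
      simp only [List.filter_cons, List.filter_nil, hm, h2]
      norm_num
      omega

-- odd indices of range n, in order
lemma pvFilter_odd (n : Nat) :
    (PySem.List.pyRange 0 n 1).filter (fun i => decide (¬ PySem.Int.mod i 2 = 0)) =
      (List.range (n / 2)).map (fun k => ((2 * k + 1 : Nat) : Int)) := by
  induction n with
  | zero => simp [PySem.List.pyRange_one_eq_nil]
  | succ n ih =>
    rw [show ((n + 1 : Nat) : Int) = (n : Int) + 1 by push_cast; ring,
      PySem.List.pyRange_one_succ_right (by omega), List.filter_append, ih]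
    have hm : PySem.Int.mod (n : Int) 2 = ((n % 2 : Nat) : Int) := PySem.Int.mod_natCast n 2
    by_cases hpar : n % 2 = 0
    · have h2 : (n + 1) / 2 = n / 2 := by omega
      simp only [List.filter_cons, List.filter_nil, hm, h2, hpar]
      norm_num
    · rw [show (n + 1) / 2 = n / 2 + 1 by omega, List.range_succ, List.map_append]
      simp only [List.filter_cons, List.filter_nil, hm]
      norm_num
      rw [if_pos (by omega)]
      congr 1
      omega

-- the gather round, split at the even/odd boundary
lemma pvSplit (cur : List Char) :
    pvRound cur =
      (List.range ((cur.length + 1) / 2)).map (fun k => cur.getD (2 * k) ' ') ++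
      (List.range (cur.length / 2)).map (fun k => cur.getD (2 * k + 1) ' ') := by
  unfold pvRound
  conv_lhs => rw [show cur.length = (cur.length + 1) / 2 + cur.length / 2 by omega, List.range_add,
    List.map_append]
  congr 1
  · apply List.map_congr_left
    intro k hk
    simp only [List.mem_range] at hk
    rw [pvF, if_pos (by omega)]
  · rw [List.map_map]
    apply List.map_congr_left
    intro k hk
    simp only [List.mem_range] at hk
    simp only [Function.comp_apply]
    rw [pvF, if_neg (by omega)]
    congr 1
    omega

-- A's inner loop equals one gather round
lemma pvInner_eq_round (cur : List Char) :
    (((PySem.List.pyRange 0 (cur.length : Int) 1).foldl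
        (fun (st : List Char × List Char) i =>
          if PySem.Int.mod i 2 = 0 then
            (st.1 ++ [PySem.List.pyGetD cur i ' '], st.2)
          else
            (st.1, st.2 ++ [PySem.List.pyGetD cur i ' ']))
        ([], [])).1 ++
     ((PySem.List.pyRange 0 (cur.length : Int) 1).foldl
        (fun (st : List Char × List Char) i =>
          if PySem.Int.mod i 2 = 0 then
            (st.1 ++ [PySem.List.pyGetD cur i ' '], st.2)
          else
            (st.1, st.2 ++ [PySem.List.pyGetD cur i ' ']))
        ([], [])).2) = pvRound cur := by
  have hstep :
      (fun (st : List Char × List Char) (i : Int) =>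
        if PySem.Int.mod i 2 = 0 then
          (st.1 ++ [PySem.List.pyGetD cur i ' '], st.2)
        else
          (st.1, st.2 ++ [PySem.List.pyGetD cur i ' '])) =
      (fun (st : List Char × List Char) (i : Int) =>
        ((if PySem.Int.mod i 2 = 0 then st.1 ++ [PySem.List.pyGetD cur i ' '] else st.1),
         (if ¬ PySem.Int.mod i 2 = 0 then st.2 ++ [PySem.List.pyGetD cur i ' '] else st.2))) := by
    funext st i; split_ifs <;> simp_all
  rw [hstep,
    PySem.List.foldl_prod_mk
      (f := fun acc i => if PySem.Int.mod i 2 = 0 then acc ++ [PySem.List.pyGetD cur i ' '] else acc)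
      (g := fun acc i => if ¬ PySem.Int.mod i 2 = 0 then acc ++ [PySem.List.pyGetD cur i ' '] else acc),
    PySem.List.foldl_append_ite (p := fun i => PySem.Int.mod i 2 = 0) (f := fun i => PySem.List.pyGetD cur i ' '),
    PySem.List.foldl_append_ite (p := fun i => ¬ PySem.Int.mod i 2 = 0) (f := fun i => PySem.List.pyGetD cur i ' ')]
  simp only [List.nil_append, pvFilter_even, pvFilter_odd, List.map_map]
  rw [pvSplit]
  congr 1 <;>
  · apply List.map_congr_left
    intro k _
    simp only [Function.comp_apply, PySem.List.pyGetD_natCast]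

-- a round applied to a gathered list composes the index maps
lemma pvRound_gather (l : List Char) (g : Nat → Nat) :
    pvRound ((List.range l.length).map (fun j => l.getD (g j) ' ')) =
      (List.range l.length).map (fun j => l.getD (g (pvF l.length j)) ' ') := by
  unfold pvRound
  rw [List.length_map, List.length_range]
  apply List.map_congr_left
  intro j hj
  simp only [List.mem_range] at hj
  have hf := pvF_lt (n := l.length) hj
  rw [List.getD_eq_getElem?_getD, List.getElem?_map, List.getElem?_range hf]
  simp

-- first round: pvRound l is itself a gather with map pvF
lemma pvRound_eq_gather (l : List Char) :
    pvRound l = (List.range l.length).map (fun j => l.getD (pvF l.length j) ' ') := rfl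

-- B's Int-valued index map agrees with pvF on indices below n
lemma pvF_int_cast (n k : Nat) :
    (if (k : Int) < PySem.Int.floordiv ((n : Int) + 1) 2 then 2 * (k : Int)
     else 2 * ((k : Int) - PySem.Int.floordiv ((n : Int) + 1) 2) + 1) = ((pvF n k : Nat) : Int) := by
  have hfd : PySem.Int.floordiv ((n : Int) + 1) 2 = (((n + 1) / 2 : Nat) : Int) := by
    rw [show ((n : Int) + 1) = ((n + 1 : Nat) : Int) by push_cast; ring]
    exact_mod_cast PySem.Int.floordiv_natCast (n + 1) 2
  rw [hfd]
  unfold pvF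
  split_ifs with h1 h2 h2 <;> push_cast <;> omega

-- ===== VERDICT (by name: the statement is the Claim_ definition above) =====
theorem text_shuffle1_spec : Claim_equal_text_shuffle1 := by
  intro text _
  unfold Spec_text_shuffle1 text_shuffle1 text_shuffle1_alt
  simp only [show PySem.List.pyRange 0 4 1 = [0, 1, 2, 3] from rfl, List.foldl_cons,
    List.foldl_nil, pvInner_eq_round]
  congr 1
  set l := text.toList with hl
  set n := l.length with hn
  -- A: compose the four gather rounds
  rw [pvRound_eq_gather l,
    pvRound_gather l (fun j => pvF n j),
    pvRound_gather l (fun j => pvF n (pvF n j)),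
    pvRound_gather l (fun j => pvF n (pvF n (pvF n j)))]
  -- B: the gather over pyRange, pointwise
  rw [PySem.List.pyRange_zero_nat n, List.map_map]
  apply List.map_congr_left
  intro k _
  simp only [Function.comp_apply]
  rw [pvF_int_cast n k, pvF_int_cast n _, pvF_int_cast n _, pvF_int_cast n _,
    PySem.List.pyGetD_natCast]
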